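-- pv_equiv track=rewrite | github.com/teabolt/dcu_case_1721 | year2_1819/computer_programming_3_algorithms_data_structures/2019_01_26_16_02_32_255813_organised/w5_trees_intro/make_a_balanced_tree.py | r_make_list
-- ===== SOURCE A (Python) =====
-- def r_make_list(lst):
--     N = len(lst)
--     if N == 0:
--         return lst
--     elif N == 1:
--         return lst
--     elif N == 2:
--         return lst
--     else:
--         mid = N//2
--         return [lst[mid]]+r_make_list(lst[:mid])+r_make_list(lst[mid+1:])
-- ===== SOURCE B (Python) =====
-- def r_make_list(lst):
--     out = []
--     stack = [(0, len(lst))]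
--     while stack:
--         lo, hi = stack.pop()
--         if hi - lo <= 2:
--             out.extend(lst[lo:hi])
--         else:
--             mid = lo + (hi - lo) // 2
--             out.append(lst[mid])
--             stack.append((mid + 1, hi))
--             stack.append((lo, mid))
--     return out
-- ===== Notes on version B (the rewrite author's own statement) =====
-- stated objective: alternative
-- what changed: Replaces the recursive midpoint split that builds fresh sublists at every level with an iterative explicit-stack loop over (lo, hi) index ranges into the original list, appending to a single output list.
import Mathlib
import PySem

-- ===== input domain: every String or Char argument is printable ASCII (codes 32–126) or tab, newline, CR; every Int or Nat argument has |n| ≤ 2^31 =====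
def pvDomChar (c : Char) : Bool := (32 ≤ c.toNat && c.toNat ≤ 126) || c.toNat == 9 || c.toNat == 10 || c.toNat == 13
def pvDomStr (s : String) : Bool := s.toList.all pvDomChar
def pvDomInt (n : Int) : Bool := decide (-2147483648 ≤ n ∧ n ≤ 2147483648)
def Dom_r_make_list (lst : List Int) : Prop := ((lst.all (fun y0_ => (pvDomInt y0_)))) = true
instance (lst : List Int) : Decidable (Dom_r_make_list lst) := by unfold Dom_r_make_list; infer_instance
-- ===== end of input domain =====

-- B replaces A's recursive midpoint split (which copies sublists at every level) by an
-- iterative loop over an explicit stack of (lo, hi) index ranges into the original list.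

-- ===== PORT A =====
-- Literal port of A. len/indices are Nat (Python's len is nonnegative, N//2 = Nat division).
def r_make_list (lst : List Int) : List Int :=
  let N := lst.length
  if N = 0 then lst
  else if N = 1 then lst
  else if N = 2 then lst
  else
    let mid := N / 2
    (PySem.List.pyGet? lst (mid : Int)).toList
      ++ r_make_list (PySem.List.slice lst none (some (mid : Int)))
      ++ r_make_list (PySem.List.slice lst (some ((mid : Int) + 1)) none)
termination_by lst.length
decreasing_by
  · simp only [PySem.List.slice_to_natCast, List.length_take]
    omega
  · have : ((mid : Int) + 1) = (((mid + 1 : Nat) : Int)) := by push_cast; ring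
    rw [this, PySem.List.slice_from_natCast]
    simp only [List.length_drop]
    omega

-- ===== PORT B =====
-- B's loop: pop a range; small ranges are emitted in order, otherwise emit lst[mid] and
-- push right then left.  Indices are Nat (all Python index values here are ≥ 0).
def pvAltLoop (lst : List Int) (stack : List (Nat × Nat)) (out : List Int) : List Int :=
  match stack with
  | [] => out
  | (lo, hi) :: rest =>
    if hi - lo ≤ 2 then
      pvAltLoop lst rest (out ++ PySem.List.slice lst (some (lo : Int)) (some (hi : Int)))
    else
      let mid := lo + (hi - lo) / 2
      pvAltLoop lst ((lo, mid) :: (mid + 1, hi) :: rest)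
        (out ++ (PySem.List.pyGet? lst (mid : Int)).toList)
termination_by (stack.map (fun p => 2 * (p.2 - p.1))).sum + stack.length
decreasing_by
  · simp only [List.map_cons, List.sum_cons, List.length_cons]
    omega
  · simp only [List.map_cons, List.sum_cons, List.length_cons]
    omega

def r_make_list_alt (lst : List Int) : List Int :=
  pvAltLoop lst [(0, lst.length)] []

-- ===== PRECONDITION & SPEC =====
def Spec_r_make_list (lst : List Int) (out : List Int) : Prop := out = r_make_list_alt lst
instance (lst : List Int) (out : List Int) : Decidable (Spec_r_make_list lst out) := by unfold Spec_r_make_list; infer_instance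

-- ===== CLAIM (what is proved, stated in full; the proofs are below) =====
def Claim_equal_r_make_list : Prop := ∀ (lst : List Int), Dom_r_make_list lst → Spec_r_make_list lst (r_make_list lst)

-- ===== LEMMAS AND PROOFS =====

-- the contiguous segment lst[lo:hi] (lo ≤ hi ≤ lst.length in all uses)
def pvSeg (lst : List Int) (lo hi : Nat) : List Int := (lst.drop lo).take (hi - lo)

lemma pvSeg_length (lst : List Int) (lo hi : Nat) (_h1 : lo ≤ hi) (h2 : hi ≤ lst.length) :
    (pvSeg lst lo hi).length = hi - lo := by
  simp [pvSeg]; omega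

lemma pvSeg_full (lst : List Int) : pvSeg lst 0 lst.length = lst := by
  simp [pvSeg]

lemma pvSeg_take (lst : List Int) (lo hi m : Nat) (hm : m ≤ hi - lo) :
    (pvSeg lst lo hi).take m = pvSeg lst lo (lo + m) := by
  unfold pvSeg
  rw [List.take_take]
  congr 1
  omega

lemma pvSeg_drop (lst : List Int) (lo hi m : Nat) :
    (pvSeg lst lo hi).drop m = pvSeg lst (lo + m) hi := by
  simp [pvSeg, List.drop_take, List.drop_drop]
  congr 1
  omega

lemma pvSeg_get (lst : List Int) (lo hi m : Nat) (h1 : lo + m < hi) (h2 : hi ≤ lst.length) :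
    (pvSeg lst lo hi)[m]? = lst[lo + m]? := by
  have hm : m < (pvSeg lst lo hi).length := by
    rw [pvSeg_length lst lo hi (by omega) h2]; omega
  have hlm : lo + m < lst.length := by omega
  rw [List.getElem?_eq_getElem hm, List.getElem?_eq_getElem hlm]
  simp [pvSeg, List.getElem_take, List.getElem_drop]

-- unfolding of A's port on a segment, in terms of absolute indices
lemma rml_seg (lst : List Int) (lo hi : Nat) (h1 : lo ≤ hi) (h2 : hi ≤ lst.length)
    (h3 : ¬ hi - lo ≤ 2) :
    r_make_list (pvSeg lst lo hi)
      = (lst[lo + (hi - lo) / 2]?).toList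
        ++ r_make_list (pvSeg lst lo (lo + (hi - lo) / 2))
        ++ r_make_list (pvSeg lst (lo + (hi - lo) / 2 + 1) hi) := by
  have hlen := pvSeg_length lst lo hi h1 h2
  rw [r_make_list]
  rw [hlen]
  have e0 : ¬ (hi - lo = 0) := by omega
  have e1 : ¬ (hi - lo = 1) := by omega
  have e2 : ¬ (hi - lo = 2) := by omega
  simp only [e0, e1, e2, if_false]
  have hmid : (hi - lo) / 2 ≤ hi - lo := by omega
  rw [PySem.List.slice_to_natCast]
  have hc : (((hi - lo) / 2 : Nat) : Int) + 1 = (((hi - lo) / 2 + 1 : Nat) : Int) := by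
    push_cast; ring
  rw [hc, PySem.List.slice_from_natCast]
  rw [pvSeg_take lst lo hi _ hmid, pvSeg_drop lst lo hi _]
  rw [PySem.List.pyGet?_natCast, pvSeg_get lst lo hi _ (by omega) h2, ← Nat.add_assoc]

lemma rml_seg_small (lst : List Int) (lo hi : Nat) (h3 : hi - lo ≤ 2) :
    r_make_list (pvSeg lst lo hi) = pvSeg lst lo hi := by
  have : (pvSeg lst lo hi).length ≤ 2 := by
    simp [pvSeg]; omega
  rw [r_make_list]
  interval_cases h : (pvSeg lst lo hi).length <;> simp

-- the loop processes the top range exactly as A processes that segment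
lemma pvAltLoop_cons (lst : List Int) :
    ∀ n lo hi rest out, hi - lo = n → lo ≤ hi → hi ≤ lst.length →
      pvAltLoop lst ((lo, hi) :: rest) out
        = pvAltLoop lst rest (out ++ r_make_list (pvSeg lst lo hi)) := by
  intro n
  induction n using Nat.strong_induction_on with
  | _ n ih =>
    intro lo hi rest out hn h1 h2
    by_cases hsmall : hi - lo ≤ 2
    · rw [pvAltLoop, if_pos hsmall, rml_seg_small lst lo hi hsmall]
      congr 1
      simp [pvSeg, PySem.List.slice_natCast]
    · rw [pvAltLoop, if_neg hsmall]
      set mid := lo + (hi - lo) / 2 with hmid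
      have hlt1 : mid - lo < n := by omega
      have hlt2 : hi - (mid + 1) < n := by omega
      rw [ih _ hlt1 lo mid _ _ rfl (by omega) (by omega)]
      rw [ih _ hlt2 (mid + 1) hi _ _ rfl (by omega) h2]
      rw [rml_seg lst lo hi h1 h2 hsmall]
      have hg : PySem.List.pyGet? lst ((mid : Nat) : Int) = lst[mid]? := by
        simp [PySem.List.pyGet?_natCast]
      rw [hg]
      simp [List.append_assoc, hmid]

-- ===== VERDICT (by name: the statement is the Claim_ definition above) =====
theorem r_make_list_spec : Claim_equal_r_make_list := by
  intro lst _
  unfold Spec_r_make_list r_make_list_alt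
  rw [pvAltLoop_cons lst (lst.length - 0) 0 lst.length [] [] rfl (by omega) (by omega)]
  rw [pvSeg_full, pvAltLoop]
  simp
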